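-- pv_equiv track=rewrite | github.com/carlosazaustre/data-structures-alogorithms-nanodegree | P0/Task3.py | numberOfCallsFromAndToBangalore
-- ===== SOURCE A (Python) =====
-- def isBangaloreNumber(telephone_number):
--   if telephone_number[0:5] == "(080)":
--     return True
--
-- def numberOfCallsFromAndToBangalore(calls):
--   matching_calls = 0
--   from_bangalore_calls = 0
--   for line in calls:
--     if isBangaloreNumber(line[0]):
--       from_bangalore_calls += 1
--       if isBangaloreNumber(line[1]):
--         matching_calls += 1
--   return matching_calls, from_bangalore_calls
-- ===== SOURCE B (Python) =====
-- def numberOfCallsFromAndToBangalore(calls):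
--     # Bucket every call into a histogram keyed by its (from-Bangalore, to-Bangalore)
--     # classification, then read the two relevant buckets.
--     tally = {}
--     for line in calls:
--         key = (line[0][:5] == "(080)", line[1][:5] == "(080)")
--         tally[key] = tally.get(key, 0) + 1
--     both = tally.get((True, True), 0)
--     return both, both + tally.get((True, False), 0)
-- ===== Notes on version B (the rewrite author's own statement) =====
-- stated objective: alternative
-- what changed: Replaces A's single pass with two nested counters by a histogram: each call is classified into a (from-Bangalore, to-Bangalore) boolean bucket in a dict, and the answers are read off the (True,True) and (True,False) buckets afterwards.
import Mathlib
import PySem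

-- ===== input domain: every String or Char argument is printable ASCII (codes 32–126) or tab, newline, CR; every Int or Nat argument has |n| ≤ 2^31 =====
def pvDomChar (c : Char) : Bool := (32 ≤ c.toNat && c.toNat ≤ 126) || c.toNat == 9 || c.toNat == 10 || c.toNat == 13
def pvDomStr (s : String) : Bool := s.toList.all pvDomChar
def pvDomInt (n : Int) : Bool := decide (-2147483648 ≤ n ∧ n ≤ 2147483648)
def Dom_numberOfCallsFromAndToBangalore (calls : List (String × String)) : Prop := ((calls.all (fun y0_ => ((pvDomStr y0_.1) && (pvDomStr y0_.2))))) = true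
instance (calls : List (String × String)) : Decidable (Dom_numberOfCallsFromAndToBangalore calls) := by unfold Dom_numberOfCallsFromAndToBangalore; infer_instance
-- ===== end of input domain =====

-- B replaces A's single nested-counter pass by a histogram dict keyed by the
-- (from-Bangalore, to-Bangalore) boolean classification of each call (alternative, same cost).

-- ===== PORT A =====
-- helper isBangaloreNumber: Python returns True (truthy) or None (falsy); ported as Bool
def isBangaloreNumber (telephone_number : String) : Bool :=
  PySem.Chars.slice telephone_number.toList (some 0) (some 5) == "(080)".toList

def numberOfCallsFromAndToBangalore (calls : List (String × String)) : Int × Int :=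
  -- state = (matching_calls, from_bangalore_calls), updated exactly as A's loop body does
  let st := calls.foldl (fun (st : Int × Int) line =>
    if isBangaloreNumber line.1 then
      if isBangaloreNumber line.2 then (st.1 + 1, st.2 + 1) else (st.1, st.2 + 1)
    else st) (0, 0)
  (st.1, st.2)

-- ===== PORT B =====
-- key = (line[0][:5] == "(080)", line[1][:5] == "(080)")
def bangaloreKey (line : String × String) : Bool × Bool :=
  (PySem.Chars.slice line.1.toList (some 0) (some 5) == "(080)".toList,
   PySem.Chars.slice line.2.toList (some 0) (some 5) == "(080)".toList)

def numberOfCallsFromAndToBangalore_alt (calls : List (String × String)) : Int × Int :=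
  let tally := calls.foldl (fun (d : PySem.Dict (Bool × Bool) Int) line =>
      d.insert (bangaloreKey line) (d.getD (bangaloreKey line) 0 + 1)) PySem.Dict.empty
  let both := tally.getD (true, true) 0
  (both, both + tally.getD (true, false) 0)

-- ===== PRECONDITION & SPEC =====
def Spec_numberOfCallsFromAndToBangalore (calls : List (String × String)) (out : Int × Int) : Prop := out = numberOfCallsFromAndToBangalore_alt calls
instance (calls : List (String × String)) (out : Int × Int) : Decidable (Spec_numberOfCallsFromAndToBangalore calls out) := by unfold Spec_numberOfCallsFromAndToBangalore; infer_instance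

-- ===== CLAIM (what is proved, stated in full; the proofs are below) =====
def Claim_equal_numberOfCallsFromAndToBangalore : Prop := ∀ (calls : List (String × String)), Dom_numberOfCallsFromAndToBangalore calls → Spec_numberOfCallsFromAndToBangalore calls (numberOfCallsFromAndToBangalore calls)

-- ===== LEMMAS AND PROOFS =====

-- B's tally bucket = the count of that classification among the mapped keys
theorem tally_getD (calls : List (String × String)) (k : Bool × Bool) :
    (calls.foldl (fun (d : PySem.Dict (Bool × Bool) Int) line =>
        d.insert (bangaloreKey line) (d.getD (bangaloreKey line) 0 + 1)) PySem.Dict.empty).getD k 0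
      = ((calls.map bangaloreKey).count k : Int) := by
  rw [← List.foldl_map (f := bangaloreKey)
        (g := fun (d : PySem.Dict (Bool × Bool) Int) x => d.insert x (d.getD x 0 + 1)),
      PySem.Dict.foldl_insert_getD_add_one_eq_counter, PySem.Dict.getD_counter]

-- A's loop state in terms of the same classification counts
theorem loop_invariant (l : List (String × String)) (m n : Int) :
    l.foldl (fun (st : Int × Int) line =>
      if isBangaloreNumber line.1 then
        if isBangaloreNumber line.2 then (st.1 + 1, st.2 + 1) else (st.1, st.2 + 1)
      else st) (m, n)
    = (m + ((l.map bangaloreKey).count (true, true) : Int),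
       n + ((l.map bangaloreKey).count (true, true) : Int)
         + ((l.map bangaloreKey).count (true, false) : Int)) := by
  induction l generalizing m n with
  | nil => simp
  | cons hd tl ih =>
    have hkey : bangaloreKey hd = (isBangaloreNumber hd.1, isBangaloreNumber hd.2) := rfl
    simp only [List.foldl_cons, List.map_cons, List.count_cons, hkey]
    by_cases h1 : isBangaloreNumber hd.1 <;> by_cases h2 : isBangaloreNumber hd.2 <;>
      simp only [h1, h2, if_true, if_false, ih, Bool.false_eq_true] <;>
      refine Prod.ext ?_ ?_ <;> simp <;> ring

-- ===== VERDICT (by name: the statement is the Claim_ definition above) =====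
theorem numberOfCallsFromAndToBangalore_spec : Claim_equal_numberOfCallsFromAndToBangalore := by
  intro calls _
  unfold Spec_numberOfCallsFromAndToBangalore numberOfCallsFromAndToBangalore numberOfCallsFromAndToBangalore_alt
  simp only [loop_invariant, tally_getD, zero_add]
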